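-- pv_equiv track=rewrite | github.com/saurabh98s/calhacks24 | backend/app/services/enhanced_memory_manager.py | _analyze_group_mood
-- ===== SOURCE A (Python) =====
-- from typing import Dict, Any, List, Optional
--
-- def _analyze_group_mood(user_memories: List[Dict]) -> str:
--     """Analyze overall group mood"""
--     if not user_memories:
--         return "neutral"
--
--     moods = [mem.get('current_mood', 'neutral') for mem in user_memories]
--
--     # Count positive vs negative
--     positive = sum(1 for m in moods if m in ['excited', 'happy'])
--     negative = sum(1 for m in moods if m in ['frustrated', 'sad', 'bored'])
--
--     if positive > negative:
--         return "positive"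
--     elif negative > positive:
--         return "needs_energy"
--     else:
--         return "neutral"
-- ===== SOURCE B (Python) =====
-- _WEIGHTS = {'excited': 1, 'happy': 1, 'frustrated': -1, 'sad': -1, 'bored': -1}
--
-- def _analyze_group_mood(user_memories):
--     """Classify group mood via one net weighted score instead of two separate counts."""
--     net = 0
--     for mem in user_memories:
--         net += _WEIGHTS.get(mem.get('current_mood', 'neutral'), 0)
--     if net > 0:
--         return "positive"
--     if net < 0:
--         return "needs_energy"
--     return "neutral"
-- ===== Notes on version B (the rewrite author's own statement) =====
-- stated objective: simpler
-- what changed: Replaces the two separate positive/negative membership counts and three-way count comparison with a single net score summed from a mood->weight table, with the sign of the net deciding the label (empty list falls out as net==0).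
import Mathlib
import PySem

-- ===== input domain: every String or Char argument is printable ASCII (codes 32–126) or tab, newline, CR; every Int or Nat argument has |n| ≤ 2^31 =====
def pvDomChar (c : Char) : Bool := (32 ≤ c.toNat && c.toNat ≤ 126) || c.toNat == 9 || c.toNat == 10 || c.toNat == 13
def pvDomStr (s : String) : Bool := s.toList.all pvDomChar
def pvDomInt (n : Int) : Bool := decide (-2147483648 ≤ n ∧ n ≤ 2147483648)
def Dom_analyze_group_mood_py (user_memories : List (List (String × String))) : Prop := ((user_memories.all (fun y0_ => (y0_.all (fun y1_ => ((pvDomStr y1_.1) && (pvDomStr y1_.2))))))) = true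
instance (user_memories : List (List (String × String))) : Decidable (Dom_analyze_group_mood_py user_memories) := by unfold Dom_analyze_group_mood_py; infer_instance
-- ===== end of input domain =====

-- B replaces the two separate positive/negative counts with one net weighted score
-- from a mood->weight table (simpler decomposition; same O(n) cost).

-- ===== PORT A =====
def analyze_group_mood_py (user_memories : List (List (String × String))) : String :=
  if user_memories = [] then "neutral"
  else
    let moods := user_memories.map (fun mem => (PySem.Dict.mk mem).getD "current_mood" "neutral")
    let positive := moods.countP (fun m => m ∈ (["excited", "happy"] : List String))
    let negative := moods.countP (fun m => m ∈ (["frustrated", "sad", "bored"] : List String))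
    if positive > negative then "positive"
    else if negative > positive then "needs_energy"
    else "neutral"

-- ===== PORT B =====
def pvWeights : PySem.Dict String Int :=
  PySem.Dict.mk [("excited", 1), ("happy", 1), ("frustrated", -1), ("sad", -1), ("bored", -1)]

def analyze_group_mood_py_alt (user_memories : List (List (String × String))) : String :=
  let net : Int := user_memories.foldl
    (fun acc mem => acc + pvWeights.getD ((PySem.Dict.mk mem).getD "current_mood" "neutral") 0) 0
  if net > 0 then "positive"
  else if net < 0 then "needs_energy"
  else "neutral"

-- ===== PRECONDITION & SPEC =====
def Spec_analyze_group_mood_py (user_memories : List (List (String × String))) (out : String) : Prop := out = analyze_group_mood_py_alt user_memories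
instance (user_memories : List (List (String × String))) (out : String) : Decidable (Spec_analyze_group_mood_py user_memories out) := by unfold Spec_analyze_group_mood_py; infer_instance

-- ===== CLAIM (what is proved, stated in full; the proofs are below) =====
def Claim_equal_analyze_group_mood_py : Prop := ∀ (user_memories : List (List (String × String))), Dom_analyze_group_mood_py user_memories → Spec_analyze_group_mood_py user_memories (analyze_group_mood_py user_memories)

-- ===== LEMMAS AND PROOFS =====

-- per-element: the table weight is (positive indicator) - (negative indicator)
theorem pvWeight_eq (m : String) :
    pvWeights.getD m 0 =
      (if m ∈ (["excited", "happy"] : List String) then (1 : Int) else 0) -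
      (if m ∈ (["frustrated", "sad", "bored"] : List String) then (1 : Int) else 0) := by
  by_cases h1 : m = "excited"; · subst h1; decide
  by_cases h2 : m = "happy"; · subst h2; decide
  by_cases h3 : m = "frustrated"; · subst h3; decide
  by_cases h4 : m = "sad"; · subst h4; decide
  by_cases h5 : m = "bored"; · subst h5; decide
  have g1 : ("excited" == m) = false := beq_eq_false_iff_ne.mpr (fun h => h1 h.symm)
  have g2 : ("happy" == m) = false := beq_eq_false_iff_ne.mpr (fun h => h2 h.symm)
  have g3 : ("frustrated" == m) = false := beq_eq_false_iff_ne.mpr (fun h => h3 h.symm)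
  have g4 : ("sad" == m) = false := beq_eq_false_iff_ne.mpr (fun h => h4 h.symm)
  have g5 : ("bored" == m) = false := beq_eq_false_iff_ne.mpr (fun h => h5 h.symm)
  have : pvWeights.getD m 0 = 0 := by
    simp [pvWeights, PySem.Dict.getD, PySem.Dict.get?, List.find?, g1, g2, g3, g4, g5]
  simp [this, h1, h2, h3, h4, h5]

-- loop invariant: the net fold equals acc + positive count - negative count
theorem pvNet_eq (l : List (List (String × String))) (acc : Int) :
    l.foldl (fun acc mem => acc + pvWeights.getD ((PySem.Dict.mk mem).getD "current_mood" "neutral") 0) acc =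
      acc +
      ((l.map (fun mem => (PySem.Dict.mk mem).getD "current_mood" "neutral")).countP
        (fun m => m ∈ (["excited", "happy"] : List String)) : Int) -
      ((l.map (fun mem => (PySem.Dict.mk mem).getD "current_mood" "neutral")).countP
        (fun m => m ∈ (["frustrated", "sad", "bored"] : List String)) : Int) := by
  induction l generalizing acc with
  | nil => simp
  | cons mem rest ih =>
    rw [List.foldl_cons, ih]
    simp only [List.map_cons, List.countP_cons, pvWeight_eq, decide_eq_true_eq]
    split_ifs <;> push_cast <;> ring

-- ===== VERDICT (by name: the statement is the Claim_ definition above) =====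
theorem analyze_group_mood_py_spec : Claim_equal_analyze_group_mood_py := by
  intro ums _
  unfold Spec_analyze_group_mood_py analyze_group_mood_py analyze_group_mood_py_alt
  simp only [pvNet_eq, zero_add]
  by_cases he : ums = []
  · subst he; simp
  · simp only [he, if_false]
    split_ifs <;> first | rfl | omega
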